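-- pv_equiv track=rewrite | github.com/KevinHeiwa/MCGTM | Watermark/interesting_functions.py | find_first_match
-- ===== SOURCE A (Python) =====
-- case_2 = ["=","==","#",">","<",">=","<="]  #,"\t#","//","!="
--
-- case_3 = ["(","[","'",'"','{']
--
-- def find_first_match(string):
--     if '"""' in string:
--         return string
--     else:
--         for char in string:
--             if char in case_2 or char in case_3:
--                 return char
--
--     return None
-- ===== SOURCE B (Python) =====
-- case_2 = ["=","==","#",">","<",">=","<="]
--
-- case_3 = ["(","[","'",'"','{']
--
-- def find_first_match(string):
--     # Per-special-character find + minimum-index selection instead of a single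
--     # left-to-right scan.  Multi-char entries of case_2 can never equal a single
--     # character, so the effective specials are these nine characters.
--     if '"""' in string:
--         return string
--     best = -1
--     for ch in "=#><(['\"{":
--         i = string.find(ch)
--         if i != -1 and (best == -1 or i < best):
--             best = i
--     if best == -1:
--         return None
--     return string[best]
-- ===== Notes on version B (the rewrite author's own statement) =====
-- stated objective: faster
-- what changed: Replaces A's per-character Python loop testing each character against two lists with nine str.find calls (one per effective single-character special) and a minimum-index selection, indexing the string at the winning position.
import Mathlib
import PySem

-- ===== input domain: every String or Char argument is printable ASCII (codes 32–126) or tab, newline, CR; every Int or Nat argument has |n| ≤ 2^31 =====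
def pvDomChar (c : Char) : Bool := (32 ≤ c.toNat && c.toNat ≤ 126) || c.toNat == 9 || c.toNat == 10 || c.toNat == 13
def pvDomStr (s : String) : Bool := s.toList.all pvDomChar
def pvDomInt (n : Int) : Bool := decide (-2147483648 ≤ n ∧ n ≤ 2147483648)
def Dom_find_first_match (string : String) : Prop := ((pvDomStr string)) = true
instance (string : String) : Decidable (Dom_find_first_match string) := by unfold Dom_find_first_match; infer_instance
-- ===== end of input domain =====

-- B replaces A's per-character Python loop with nine str.find calls and a minimum-index
-- selection (objective: faster by a constant factor — the scans run inside str.find).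

-- ===== PORT A =====
def case_2 : List String := ["=", "==", "#", ">", "<", ">=", "<="]

def case_3 : List String := ["(", "[", "'", "\"", "{"]

-- the 'for char in string' loop: first char (as a 1-char string) lying in case_2 or case_3
def ffmScan : List Char → Option String
  | [] => none
  | c :: rest =>
    if String.singleton c ∈ case_2 ∨ String.singleton c ∈ case_3 then some (String.singleton c)
    else ffmScan rest

def find_first_match (string : String) : Option String :=
  if PySem.Str.isIn "\"\"\"" string then some string
  else ffmScan string.toList

-- ===== PORT B =====
-- the nine effective single-character specials, in Source B's order
def ffmSpecials : List Char := ['=', '#', '>', '<', '(', '[', '\'', '"', '{']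

-- the 'for ch in specials' loop of Source B, carrying the running best (smallest) found index
def ffmBest (s : String) : List Char → Int → Int
  | [], best => best
  | ch :: rest, best =>
    let i := PySem.Str.find s (String.singleton ch)
    ffmBest s rest (if i ≠ -1 ∧ (best = -1 ∨ i < best) then i else best)

def find_first_match_alt (string : String) : Option String :=
  if PySem.Str.isIn "\"\"\"" string then some string
  else
    let best := ffmBest string ffmSpecials (-1)
    if best = -1 then none
    else (PySem.Str.pyGet? string best).map String.singleton

-- ===== PRECONDITION & SPEC =====
def Spec_find_first_match (string : String) (out : Option String) : Prop := out = find_first_match_alt string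
instance (string : String) (out : Option String) : Decidable (Spec_find_first_match string out) := by unfold Spec_find_first_match; infer_instance

-- ===== CLAIM (what is proved, stated in full; the proofs are below) =====
def Claim_equal_find_first_match : Prop := ∀ (string : String), Dom_find_first_match string → Spec_find_first_match string (find_first_match string)

-- ===== LEMMAS AND PROOFS =====

-- a single character (as a 1-char string) lies in case_2 or case_3 iff it is one of the nine specials
set_option maxHeartbeats 1000000 in
theorem ffm_mem_iff (c : Char) :
    (String.singleton c ∈ case_2 ∨ String.singleton c ∈ case_3) ↔ c ∈ ffmSpecials := by
  have hs : ∀ d : Char, String.singleton c = String.singleton d ↔ c = d := fun d =>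
    ⟨fun h => by simpa using congrArg String.toList h, fun h => by rw [h]⟩
  have e1 : ("=" : String) = String.singleton '=' := by decide
  have e2 : ("#" : String) = String.singleton '#' := by decide
  have e3 : (">" : String) = String.singleton '>' := by decide
  have e4 : ("<" : String) = String.singleton '<' := by decide
  have e5 : ("(" : String) = String.singleton '(' := by decide
  have e6 : ("[" : String) = String.singleton '[' := by decide
  have e7 : ("'" : String) = String.singleton '\'' := by decide
  have e8 : ("\"" : String) = String.singleton '"' := by decide
  have e9 : ("{" : String) = String.singleton '{' := by decide
  have q1 : ¬ (String.singleton c = "==") := fun h => by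
    have h2 := congrArg String.toList h
    rw [show ("==" : String).toList = ['=', '='] from by decide] at h2
    simp at h2
  have q2 : ¬ (String.singleton c = ">=") := fun h => by
    have h2 := congrArg String.toList h
    rw [show (">=" : String).toList = ['>', '='] from by decide] at h2
    simp at h2
  have q3 : ¬ (String.singleton c = "<=") := fun h => by
    have h2 := congrArg String.toList h
    rw [show ("<=" : String).toList = ['<', '='] from by decide] at h2
    simp at h2
  simp only [case_2, case_3, ffmSpecials, List.mem_cons, List.not_mem_nil, or_false,
    e1, e2, e3, e4, e5, e6, e7, e8, e9, hs, q1, q2, q3]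
  tauto

-- find on a single-character needle: either -1 and the char is absent, or the first occurrence
theorem ffm_find_char (L : List Char) (c : Char) :
    (PySem.Chars.find L [c] = -1 ∧ c ∉ L) ∨
    (0 ≤ PySem.Chars.find L [c] ∧ (PySem.Chars.find L [c]).toNat < L.length ∧
      L[(PySem.Chars.find L [c]).toNat]? = some c ∧
      ∀ i < (PySem.Chars.find L [c]).toNat, L[i]? ≠ some c) := by
  by_cases h : PySem.Chars.find L [c] = -1
  · left
    refine ⟨h, ?_⟩
    have := (PySem.Chars.find_eq_neg_one_iff (s := L) (sub := [c])).mp h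
    simpa [List.singleton_infix_iff] using this
  · right
    have h0 : 0 ≤ PySem.Chars.find L [c] := by
      have := PySem.Chars.neg_one_le_find (s := L) (sub := [c])
      omega
    obtain ⟨hp, hmin⟩ := PySem.Chars.find_spec (s := L) (sub := [c]) h0
    set n := (PySem.Chars.find L [c]).toNat with hn
    obtain ⟨t, ht⟩ := hp
    have hdrop : L.drop n = c :: t := ht.symm
    have hlt : n < L.length := by
      have : L.drop n ≠ [] := by simp [hdrop]
      by_contra hle
      rw [not_lt] at hle
      simp [List.drop_eq_nil_iff.mpr (by omega)] at this
    refine ⟨h0, hlt, ?_, ?_⟩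
    · have : (L.drop n)[0]? = some c := by simp [hdrop]
      simpa [List.getElem?_drop] using this
    · intro i hi hsome
      apply hmin i hi
      have hilt : i < L.length := by omega
      have : L.drop i = c :: L.drop (i + 1) := by
        rw [List.drop_eq_getElem_cons hilt]
        have : L[i] = c := by
          have := List.getElem?_eq_getElem hilt
          rw [this] at hsome
          exact (Option.some.injEq _ _).mp hsome
        rw [this]
      exact ⟨L.drop (i + 1), this.symm⟩

-- invariant of Source B's loop: the accumulator is -1 while no seen special occurs, and
-- otherwise the position of the first character of the string lying in the seen set
theorem ffmBest_inv (s : String) (S : List Char) (b : Int) (seen : List Char)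
    (H : (b = -1 ∧ ∀ c ∈ seen, c ∉ s.toList) ∨
      (0 ≤ b ∧ b.toNat < s.toList.length ∧
        (∃ c ∈ seen, s.toList[b.toNat]? = some c) ∧
        ∀ i < b.toNat, ∀ c ∈ seen, s.toList[i]? ≠ some c)) :
    (ffmBest s S b = -1 ∧ ∀ c ∈ seen ++ S, c ∉ s.toList) ∨
    (0 ≤ ffmBest s S b ∧ (ffmBest s S b).toNat < s.toList.length ∧
      (∃ c ∈ seen ++ S, s.toList[(ffmBest s S b).toNat]? = some c) ∧
      ∀ i < (ffmBest s S b).toNat, ∀ c ∈ seen ++ S, s.toList[i]? ≠ some c) := by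
  induction S generalizing b seen with
  | nil => simpa [ffmBest] using H
  | cons ch rest ih =>
    rw [ffmBest]
    have hrw : seen ++ ch :: rest = (seen ++ [ch]) ++ rest := by simp
    rw [hrw]
    have hfind : PySem.Str.find s (String.singleton ch) = PySem.Chars.find s.toList [ch] := by
      simp
    apply ih
    rcases ffm_find_char s.toList ch with ⟨hneg, habs⟩ | ⟨h0, hlt, hget, hmin⟩
    · -- ch does not occur in s: the accumulator is unchanged
      rw [if_neg (by simp [hneg])]
      rcases H with ⟨hb, hnone⟩ | ⟨hb0, hblt, ⟨c, hc, hbget⟩, hbmin⟩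
      · refine Or.inl ⟨hb, ?_⟩
        intro c hc
        rcases List.mem_append.mp hc with h | h
        · exact hnone c h
        · simp only [List.mem_singleton] at h; subst h; exact habs
      · refine Or.inr ⟨hb0, hblt, ⟨c, List.mem_append_left _ hc, hbget⟩, ?_⟩
        intro i hi c' hc' hsome
        rcases List.mem_append.mp hc' with h | h
        · exact hbmin i hi c' h hsome
        · simp only [List.mem_singleton] at h; subst h
          exact habs (List.mem_of_getElem? hsome)
    · -- ch occurs in s, first at index (find s [ch])
      rcases H with ⟨hb, hnone⟩ | ⟨hb0, hblt, ⟨c, hc, hbget⟩, hbmin⟩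
      · -- accumulator was -1: it becomes find's index
        rw [if_pos ⟨by rw [hfind]; omega, Or.inl hb⟩, hfind]
        refine Or.inr ⟨h0, hlt, ⟨ch, by simp, hget⟩, ?_⟩
        intro i hi c' hc' hsome
        rcases List.mem_append.mp hc' with h | h
        · exact hnone c' h (List.mem_of_getElem? hsome)
        · simp only [List.mem_singleton] at h; subst h; exact hmin i hi hsome
      · by_cases hcmp : PySem.Chars.find s.toList [ch] < b
        · rw [if_pos ⟨by rw [hfind]; omega, Or.inr (by rw [hfind]; exact hcmp)⟩, hfind]
          refine Or.inr ⟨h0, hlt, ⟨ch, by simp, hget⟩, ?_⟩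
          intro i hi c' hc' hsome
          rcases List.mem_append.mp hc' with h | h
          · exact hbmin i (by omega) c' h hsome
          · simp only [List.mem_singleton] at h; subst h; exact hmin i hi hsome
        · rw [if_neg (by rw [hfind]; omega)]
          refine Or.inr ⟨hb0, hblt, ⟨c, List.mem_append_left _ hc, hbget⟩, ?_⟩
          intro i hi c' hc' hsome
          rcases List.mem_append.mp hc' with h | h
          · exact hbmin i hi c' h hsome
          · simp only [List.mem_singleton] at h; subst h
            exact hmin i (by omega) hsome

-- A's scan is find? over the nine specials, mapped to 1-char strings
theorem ffmScan_eq (L : List Char) :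
    ffmScan L = (L.find? (fun c => decide (c ∈ ffmSpecials))).map String.singleton := by
  induction L with
  | nil => simp [ffmScan]
  | cons c rest ih =>
    by_cases h : c ∈ ffmSpecials
    · rw [ffmScan, if_pos ((ffm_mem_iff c).mpr h)]
      simp [List.find?, h]
    · rw [ffmScan, if_neg (fun hc => h ((ffm_mem_iff c).mp hc))]
      simp [List.find?, h, ih]

-- find? at a position that satisfies the predicate and is minimal
theorem ffm_find?_at {α : Type} (p : α → Bool) (L : List α) (n : Nat) (hn : n < L.length)
    (hp : p (L[n]) = true) (hmin : ∀ i, (h : i < n) → p (L[i]'(by omega)) = false) :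
    L.find? p = some L[n] := by
  induction L generalizing n with
  | nil => simp at hn
  | cons a rest ih =>
    cases n with
    | zero => simp_all [List.find?]
    | succ m =>
      have ha : p a = false := by simpa using hmin 0 (Nat.succ_pos m)
      rw [List.find?, ha]
      simp only [List.getElem_cons_succ] at hp ⊢
      exact ih m (by simpa using hn) hp (fun i h => by simpa using hmin (i + 1) (by omega))

-- ===== VERDICT (by name: the statement is the Claim_ definition above) =====
theorem find_first_match_spec : Claim_equal_find_first_match := by
  intro s _
  unfold Spec_find_first_match find_first_match find_first_match_alt
  by_cases hq : PySem.Str.isIn "\"\"\"" s = true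
  · rw [if_pos hq, if_pos hq]
  · rw [if_neg hq, if_neg hq]
    have H := ffmBest_inv s ffmSpecials (-1) []
      (Or.inl ⟨rfl, by intro c hc; simp at hc⟩)
    rw [List.nil_append] at H
    rcases H with ⟨hb, hnone⟩ | ⟨h0, hlt, ⟨c, hc, hget⟩, hmin⟩
    · rw [ffmScan_eq, hb, if_pos rfl]
      rw [List.find?_eq_none.mpr]
      · rfl
      · intro x hx hpx
        exact hnone x (by simpa using hpx) hx
    · rw [ffmScan_eq, if_neg (by omega)]
      set n := (ffmBest s ffmSpecials (-1)).toNat with hn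
      have helem : s.toList[n] = c := by
        have := List.getElem?_eq_getElem hlt
        rw [this] at hget
        exact Option.some.inj hget
      have hA : s.toList.find? (fun c => decide (c ∈ ffmSpecials)) = some (s.toList[n]) := by
        apply ffm_find?_at _ _ n hlt
        · simp [helem, hc]
        · intro i hi
          simp only [decide_eq_false_iff_not]
          intro hmem
          exact hmin i hi _ hmem (List.getElem?_eq_getElem (by omega))
      have hB : PySem.Str.pyGet? s (ffmBest s ffmSpecials (-1)) = some (s.toList[n]) := by
        have : PySem.Str.pyGet? s (ffmBest s ffmSpecials (-1))
            = PySem.List.pyGet? s.toList (ffmBest s ffmSpecials (-1)) := by simp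
        rw [this, PySem.List.pyGet?_of_nonneg s.toList h0, ← hn]
        exact List.getElem?_eq_getElem hlt
      rw [hA, hB]
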